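-- pv_equiv track=rewrite | github.com/WeixuanJiang/agent-generator | src/auto_agent_generator/cli.py | parse_cli_flags
-- ===== SOURCE A (Python) =====
-- def parse_cli_flags(args):
--     """Parse CLI flags for llm override and restart."""
--     runner = None
--     restart = False
--     cleaned = []
--     skip_next = False
--     for i, arg in enumerate(args):
--         if skip_next:
--             skip_next = False
--             continue
--         if arg in ("--llm", "--runner"):
--             if i + 1 < len(args):
--                 runner = args[i + 1].lower()
--                 skip_next = True
--             continue
--         if arg == "--restart":
--             restart = True
--             continue
--         cleaned.append(arg)
--     return runner, restart, cleaned
-- ===== SOURCE B (Python) =====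
-- def parse_cli_flags(args):
--     """Parse CLI flags for llm override and restart."""
--     # Stage 1: classify every argument by role ('flag', 'value', 'restart', 'plain').
--     roles = []
--     expecting_value = False
--     for arg in args:
--         if expecting_value:
--             roles.append('value')
--             expecting_value = False
--         elif arg in ("--llm", "--runner"):
--             roles.append('flag')
--             expecting_value = True
--         elif arg == "--restart":
--             roles.append('restart')
--         else:
--             roles.append('plain')
--     # Stage 2: aggregate each output from the role table.
--     values = [a for a, r in zip(args, roles) if r == 'value']
--     runner = values[-1].lower() if values else None
--     restart = 'restart' in roles
--     cleaned = [a for a, r in zip(args, roles) if r == 'plain']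
--     return runner, restart, cleaned
-- ===== Notes on version B (the rewrite author's own statement) =====
-- stated objective: alternative
-- what changed: Replaced A's single accumulating pass with skip_next and args[i+1] lookback by a staged classify-then-aggregate design: one pass tags every argument with a role (flag/value/restart/plain), then runner, restart and cleaned are each derived from the role table (last value, any restart, the plain items).
import Mathlib
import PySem

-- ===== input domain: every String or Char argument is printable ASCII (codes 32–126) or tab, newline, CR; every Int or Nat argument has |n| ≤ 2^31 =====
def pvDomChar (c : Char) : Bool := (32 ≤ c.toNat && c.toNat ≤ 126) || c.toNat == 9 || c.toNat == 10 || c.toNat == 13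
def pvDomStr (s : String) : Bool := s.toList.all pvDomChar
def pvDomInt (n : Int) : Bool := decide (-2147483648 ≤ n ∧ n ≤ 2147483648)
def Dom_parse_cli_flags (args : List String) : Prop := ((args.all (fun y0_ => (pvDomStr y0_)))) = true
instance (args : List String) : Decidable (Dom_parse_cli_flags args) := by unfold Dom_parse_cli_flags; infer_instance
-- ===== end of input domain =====

-- ===== PORT A =====
-- B replaces A's single accumulating pass (skip_next flag, args[i+1] lookback) by two stages:
-- a classification pass tagging each argument with a role, then three aggregations over the
-- role table (alternative decomposition; same return value on every input).
-- Loop state of A: (runner, restart, cleaned, skip_next).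
def pvGoA (args : List String) : List (Int × String) →
    Option String × Bool × List String × Bool → Option String × Bool × List String × Bool
  | [], st => st
  | (i, arg) :: rest, (runner, restart, cleaned, skip) =>
    if skip then pvGoA args rest (runner, restart, cleaned, false)
    else if arg = "--llm" ∨ arg = "--runner" then
      if i + 1 < (args.length : Int) then
        -- args[i+1] is in range here, so pyGetD equals Python's args[i+1]
        pvGoA args rest (some (PySem.Str.lower (PySem.List.pyGetD args (i + 1) "")), restart, cleaned, true)
      else pvGoA args rest (runner, restart, cleaned, skip)
    else if arg = "--restart" then pvGoA args rest (runner, true, cleaned, skip)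
    else pvGoA args rest (runner, restart, cleaned ++ [arg], skip)

def parse_cli_flags (args : List String) : Option String × Bool × List String :=
  let st := pvGoA args (PySem.List.enumerate args 0) (none, false, [], false)
  (st.1, st.2.1, st.2.2.1)

-- ===== PORT B =====
-- Stage 1 of Source B: the role table ('flag' | 'value' | 'restart' | 'plain').
inductive PvRole : Type
  | flag | value | restart | plain
  deriving DecidableEq, Repr

def pvRoles : List String → Bool → List PvRole
  | [], _ => []
  | arg :: rest, expecting =>
    if expecting then PvRole.value :: pvRoles rest false
    else if arg = "--llm" ∨ arg = "--runner" then PvRole.flag :: pvRoles rest true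
    else if arg = "--restart" then PvRole.restart :: pvRoles rest false
    else PvRole.plain :: pvRoles rest false

def parse_cli_flags_alt (args : List String) : Option String × Bool × List String :=
  let roles := pvRoles args false
  -- Stage 2 of Source B: aggregate each output from the role table.
  let values := (args.zip roles).filterMap
    (fun p => if p.2 = PvRole.value then some p.1 else none)
  let runner := match values.getLast? with      -- values[-1].lower() if values else None
    | some v => some (PySem.Str.lower v)
    | none => none
  let restart := decide (PvRole.restart ∈ roles)   -- 'restart' in roles
  let cleaned := (args.zip roles).filterMap
    (fun p => if p.2 = PvRole.plain then some p.1 else none)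
  (runner, restart, cleaned)

-- ===== PRECONDITION & SPEC =====
def Spec_parse_cli_flags (args : List String) (out : Option String × Bool × List String) : Prop := out = parse_cli_flags_alt args
instance (args : List String) (out : Option String × Bool × List String) : Decidable (Spec_parse_cli_flags args out) := by unfold Spec_parse_cli_flags; infer_instance

-- ===== CLAIM (what is proved, stated in full; the proofs are below) =====
def Claim_equal_parse_cli_flags : Prop := ∀ (args : List String), Dom_parse_cli_flags args → Spec_parse_cli_flags args (parse_cli_flags args)

-- ===== LEMMAS AND PROOFS =====

-- Proof-only intermediate: a direct structural pass equivalent to both programs.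
def pvScan : List String → Option String → Bool → List String →
    Option String × Bool × List String
  | [], runner, restart, cleaned => (runner, restart, cleaned)
  | arg :: rest, runner, restart, cleaned =>
    if arg = "--llm" ∨ arg = "--runner" then
      match rest with
      | [] => pvScan [] runner restart cleaned
      | v :: rest' => pvScan rest' (some (PySem.Str.lower v)) restart cleaned
    else if arg = "--restart" then pvScan rest runner true cleaned
    else pvScan rest runner restart (cleaned ++ [arg])

-- A's enumerated loop on the suffix starting at i (skip_next = false) equals pvScan.
theorem pvKey (args : List String) : ∀ (l : List String) (i : Nat)
    (runner : Option String) (restart : Bool) (cleaned : List String),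
    args.drop i = l →
    pvGoA args (PySem.List.enumerate l (i : Int)) (runner, restart, cleaned, false)
      = (let r := pvScan l runner restart cleaned; (r.1, r.2.1, r.2.2, false)) := by
  have H : ∀ (n : Nat) (l : List String), l.length ≤ n → ∀ (i : Nat)
      (r : Option String) (rs : Bool) (cl : List String), args.drop i = l →
      pvGoA args (PySem.List.enumerate l (i : Int)) (r, rs, cl, false)
        = (let t := pvScan l r rs cl; (t.1, t.2.1, t.2.2, false)) := by
    intro n
    induction n with
    | zero =>
      intro l hl i r rs cl hd
      have : l = [] := List.eq_nil_of_length_eq_zero (Nat.le_zero.mp hl)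
      subst this
      simp [pvGoA, pvScan, PySem.List.enumerate_nil]
    | succ n ih =>
      intro l hl i r rs cl hd
      match l with
      | [] => simp [pvGoA, pvScan, PySem.List.enumerate_nil]
      | a :: l' =>
        have hlen := congrArg List.length hd
        simp [List.length_drop] at hlen
        have hi : i < args.length := by omega
        have hd1 : args.drop (i + 1) = l' := by
          have := congrArg List.tail hd
          rwa [List.tail_drop] at this
        rw [PySem.List.enumerate_cons]
        by_cases hfl : a = "--llm" ∨ a = "--runner"
        · cases l' with
          | nil =>
            have hlen1 : args.length = i + 1 := by
              have := congrArg List.length hd1; simp [List.length_drop] at this; omega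
            have hguard : ¬ ((i : Int) + 1 < (args.length : Int)) := by
              rw [hlen1]; push_cast; omega
            simp only [pvGoA, pvScan, PySem.List.enumerate_nil, if_neg Bool.false_ne_true,
              if_pos hfl, if_neg hguard]
          | cons v rest' =>
            have hguard : (i : Int) + 1 < (args.length : Int) := by
              have := congrArg List.length hd1; simp [List.length_drop] at this
              exact_mod_cast by omega
            have hv : PySem.List.pyGetD args ((i : Int) + 1) "" = v := by
              have hcast : (i : Int) + 1 = ((i + 1 : Nat) : Int) := by push_cast; ring
              rw [hcast, PySem.List.pyGetD_natCast]
              have : args[i+1]? = some v := by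
                have h0 : (args.drop (i+1))[0]? = some v := by rw [hd1]; rfl
                rwa [List.getElem?_drop, Nat.add_zero] at h0
              simp [List.getD, this]
            have hd2 : args.drop (i + 2) = rest' := by
              have := congrArg List.tail hd1
              rwa [List.tail_drop] at this
            have hih := ih rest' (by simp at hl; omega) (i + 2)
              (some (PySem.Str.lower v)) rs cl hd2
            simp only [pvGoA, if_neg Bool.false_ne_true, if_pos hfl, if_pos hguard, hv,
              PySem.List.enumerate_cons]
            have hcast2 : (i : Int) + 1 + 1 = ((i + 2 : Nat) : Int) := by push_cast; ring
            rw [hcast2, hih]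
            simp only [pvScan, if_pos hfl]
            exact if_pos trivial
        · by_cases hrs : a = "--restart"
          · have hih := ih l' (by simp at hl; omega) (i + 1) r true cl hd1
            simp only [pvGoA, if_neg Bool.false_ne_true, if_neg hfl, if_pos hrs]
            have hcast : (i : Int) + 1 = ((i + 1 : Nat) : Int) := by push_cast; ring
            rw [hcast, hih]
            have hstep : pvScan (a :: l') r rs cl = pvScan l' r true cl := by
              rw [pvScan.eq_def]; simp only [if_neg hfl, if_pos hrs]
            rw [hstep]
          · have hih := ih l' (by simp at hl; omega) (i + 1) r rs (cl ++ [a]) hd1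
            simp only [pvGoA, if_neg Bool.false_ne_true, if_neg hfl, if_neg hrs]
            have hcast : (i : Int) + 1 = ((i + 1 : Nat) : Int) := by push_cast; ring
            rw [hcast, hih]
            have hstep : pvScan (a :: l') r rs cl = pvScan l' r rs (cl ++ [a]) := by
              rw [pvScan.eq_def]; simp only [if_neg hfl, if_neg hrs]
            rw [hstep]
  intro l i r rs cl hd
  exact H l.length l le_rfl i r rs cl hd

def pvVals (l : List String) : List String :=
  (l.zip (pvRoles l false)).filterMap (fun p => if p.2 = PvRole.value then some p.1 else none)

def pvPlains (l : List String) : List String :=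
  (l.zip (pvRoles l false)).filterMap (fun p => if p.2 = PvRole.plain then some p.1 else none)

-- pvScan computes exactly the staged aggregation of B.
theorem pvScan_staged : ∀ (n : Nat) (l : List String), l.length ≤ n →
    ∀ (r : Option String) (rs : Bool) (cl : List String),
    pvScan l r rs cl =
      ((match (pvVals l).getLast? with
        | some v => some (PySem.Str.lower v)
        | none => r),
       rs || decide (PvRole.restart ∈ pvRoles l false),
       cl ++ pvPlains l) := by
  intro n
  induction n with
  | zero =>
    intro l hl r rs cl
    have : l = [] := List.eq_nil_of_length_eq_zero (Nat.le_zero.mp hl)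
    subst this
    simp [pvScan, pvVals, pvPlains, pvRoles]
  | succ n ih =>
    intro l hl r rs cl
    match l with
    | [] => simp [pvScan, pvVals, pvPlains, pvRoles]
    | a :: l' =>
      by_cases hfl : a = "--llm" ∨ a = "--runner"
      · cases l' with
        | nil =>
          simp [pvScan, pvVals, pvPlains, pvRoles, hfl]
        | cons v rest' =>
          have hroles : pvRoles (a :: v :: rest') false
              = PvRole.flag :: PvRole.value :: pvRoles rest' false := by
            rw [pvRoles.eq_def]; simp only [if_neg Bool.false_ne_true, if_pos hfl]
            rw [pvRoles.eq_def]; simp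
          have hvals : pvVals (a :: v :: rest') = v :: pvVals rest' := by
            simp [pvVals, hroles]
          have hplains : pvPlains (a :: v :: rest') = pvPlains rest' := by
            simp [pvPlains, hroles]
          have hstep : pvScan (a :: v :: rest') r rs cl
              = pvScan rest' (some (PySem.Str.lower v)) rs cl := by
            rw [pvScan.eq_def]; simp only [if_pos hfl]
          rw [hstep, ih rest' (by simp at hl; omega) (some (PySem.Str.lower v)) rs cl]
          rw [hvals, hplains, hroles]
          cases hlast : (pvVals rest').getLast? with
          | none =>
            have : pvVals rest' = [] := List.getLast?_eq_none_iff.mp hlast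
            simp [this]
          | some w =>
            simp [List.getLast?_cons, hlast]
      · by_cases hrs : a = "--restart"
        · have hroles : pvRoles (a :: l') false = PvRole.restart :: pvRoles l' false := by
            rw [pvRoles.eq_def]; simp only [if_neg Bool.false_ne_true, if_neg hfl, if_pos hrs]
          have hvals : pvVals (a :: l') = pvVals l' := by simp [pvVals, hroles]
          have hplains : pvPlains (a :: l') = pvPlains l' := by simp [pvPlains, hroles]
          have hstep : pvScan (a :: l') r rs cl = pvScan l' r true cl := by
            rw [pvScan.eq_def]; simp only [if_neg hfl, if_pos hrs]
          rw [hstep, ih l' (by simp at hl; omega) r true cl, hvals, hplains, hroles]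
          simp
        · have hroles : pvRoles (a :: l') false = PvRole.plain :: pvRoles l' false := by
            rw [pvRoles.eq_def]; simp only [if_neg Bool.false_ne_true, if_neg hfl, if_neg hrs]
          have hvals : pvVals (a :: l') = pvVals l' := by simp [pvVals, hroles]
          have hplains : pvPlains (a :: l') = a :: pvPlains l' := by simp [pvPlains, hroles]
          have hstep : pvScan (a :: l') r rs cl = pvScan l' r rs (cl ++ [a]) := by
            rw [pvScan.eq_def]; simp only [if_neg hfl, if_neg hrs]
          rw [hstep, ih l' (by simp at hl; omega) r rs (cl ++ [a]), hvals, hplains, hroles]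
          simp

-- ===== VERDICT (by name: the statement is the Claim_ definition above) =====
theorem parse_cli_flags_spec : Claim_equal_parse_cli_flags := by
  intro args _
  show parse_cli_flags args = parse_cli_flags_alt args
  have h := pvKey args args 0 none false [] rfl
  unfold parse_cli_flags
  rw [show ((0:Nat):Int) = 0 from rfl] at h
  rw [h]
  have h2 := pvScan_staged args.length args le_rfl none false []
  rw [h2]
  unfold parse_cli_flags_alt pvVals pvPlains
  simp
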